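-- pv_equiv track=rewrite | github.com/jiewan02/Algorithm | 프로그래머스/0/181860. 빈 배열에 추가， 삭제하기/빈 배열에 추가， 삭제하기.py | solution
-- ===== SOURCE A (Python) =====
-- def solution(arr, flag):
--     result = []
--
--     for i in range(len(flag)):
--         if flag[i]:
--             result += [arr[i]] * (arr[i] * 2)
--         else:
--             for j in range(arr[i]):
--                 if result:
--                     result.pop()
--     return result
-- ===== SOURCE B (Python) =====
-- def solution(arr, flag):
--     # Run-length block stack: each push of arr[i]*2 copies of arr[i] is one block,
--     # pops only decrement block counts; surviving blocks are expanded at the end.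
--     blocks = []  # stack of (value, count), top at the end
--     for i in range(len(flag)):
--         a = arr[i]
--         if flag[i]:
--             if a > 0:
--                 blocks.append((a, 2 * a))
--         else:
--             k = a
--             while k > 0 and blocks:
--                 v, c = blocks[-1]
--                 if c <= k:
--                     blocks.pop()
--                     k -= c
--                 else:
--                     blocks[-1] = (v, c - k)
--                     k = 0
--     out = []
--     for v, c in blocks:
--         out += [v] * c
--     return out
-- ===== Notes on version B (the rewrite author's own statement) =====
-- stated objective: alternative
-- what changed: Replaces the element-by-element list building/popping (each push appends arr[i]*2 copies, each pop removes one element per loop step) with a run-length block stack: pushes store (value,count) pairs, pops decrement counts blockwise, and only surviving blocks are expanded at the end; O(n + output size) work vs O(sum of arr values).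
import Mathlib
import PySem

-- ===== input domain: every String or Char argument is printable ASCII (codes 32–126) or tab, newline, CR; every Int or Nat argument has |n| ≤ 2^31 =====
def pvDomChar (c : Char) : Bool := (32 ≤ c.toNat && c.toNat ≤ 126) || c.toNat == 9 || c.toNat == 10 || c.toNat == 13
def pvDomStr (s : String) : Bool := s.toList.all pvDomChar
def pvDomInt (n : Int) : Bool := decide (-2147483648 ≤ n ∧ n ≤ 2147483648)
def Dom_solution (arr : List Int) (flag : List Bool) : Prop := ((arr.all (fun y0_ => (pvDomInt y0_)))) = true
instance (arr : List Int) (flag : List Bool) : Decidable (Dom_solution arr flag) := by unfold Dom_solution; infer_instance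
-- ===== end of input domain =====

-- B replaces A's element-by-element list pushes/pops by a run-length block stack
-- (pops decrement counts, surviving blocks are expanded once at the end): a different algorithm doing O(n + output size) work.

-- ===== PORT A =====
-- literal port: 'result.pop()' on a nonempty list removes the last element (value discarded);
-- 'if result:' is the nonemptiness test; arr[i]/flag[i] read via pyGetD (indices are in range on Pre_).
def solution (arr : List Int) (flag : List Bool) : List Int :=
  (PySem.List.pyRange 0 (flag.length : Int) 1).foldl
    (fun result i =>
      if PySem.List.pyGetD flag i false then
        result ++ PySem.List.pyRepeat [PySem.List.pyGetD arr i 0] (PySem.List.pyGetD arr i 0 * 2)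
      else
        (PySem.List.pyRange 0 (PySem.List.pyGetD arr i 0) 1).foldl
          (fun r _ => if r = [] then r else r.dropLast) result)
    []

-- ===== PORT B =====
-- block stack: head of the list is the top of the stack (Python keeps the top at the end);
-- popB is B's inner while loop, stepB its loop body, solution_alt the index loop plus final expansion.
def popB (k : Nat) : List (Int × Nat) → List (Int × Nat)
  | [] => []
  | (v, c) :: bs => if k = 0 then (v, c) :: bs
                    else if c ≤ k then popB (k - c) bs
                    else (v, c - k) :: bs

def stepB (bs : List (Int × Nat)) (p : Int × Bool) : List (Int × Nat) :=
  if p.2 then (if 0 < p.1 then (p.1, (2 * p.1).toNat) :: bs else bs)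
  else popB p.1.toNat bs

def solution_alt (arr : List Int) (flag : List Bool) : List Int :=
  (((PySem.List.pyRange 0 (flag.length : Int) 1).foldl
    (fun bs i => stepB bs (PySem.List.pyGetD arr i 0, PySem.List.pyGetD flag i false)) []).reverse).foldl
    (fun out p => out ++ List.replicate p.2 p.1) []

-- ===== PRECONDITION & SPEC =====
-- Pre_ excludes exactly the inputs where flag is longer than arr: there both A and B raise IndexError reading arr[i].
def Pre_solution (arr : List Int) (flag : List Bool) : Prop := flag.length ≤ arr.length
instance (arr : List Int) (flag : List Bool) : Decidable (Pre_solution arr flag) := by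
  unfold Pre_solution; infer_instance
def pvWitness_solution : List Int × List Bool := ([3, 2, 1], [true, false, true])

def Spec_solution (arr : List Int) (flag : List Bool) (out : List Int) : Prop := out = solution_alt arr flag
instance (arr : List Int) (flag : List Bool) (out : List Int) : Decidable (Spec_solution arr flag out) := by unfold Spec_solution; infer_instance

-- ===== CLAIM (what is proved, stated in full; the proofs are below) =====
def Claim_equal_solution : Prop := ∀ (arr : List Int) (flag : List Bool), Dom_solution arr flag → Pre_solution arr flag → Spec_solution arr flag (solution arr flag)

-- ===== LEMMAS AND PROOFS =====

-- the value a block stack denotes (oldest block first = bottom of the stack first)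
def expandBS (bs : List (Int × Nat)) : List Int :=
  bs.reverse.flatMap (fun p => List.replicate p.2 p.1)

def pop1 (r : List Int) : List Int := if r = [] then r else r.dropLast

def PosBS (bs : List (Int × Nat)) : Prop := ∀ p ∈ bs, 0 < p.2

theorem expandBS_cons (v : Int) (c : Nat) (bs : List (Int × Nat)) :
    expandBS ((v, c) :: bs) = expandBS bs ++ List.replicate c v := by
  simp [expandBS]

theorem foldl_const_iterate {α β : Type} (g : α → α) (l : List β) (init : α) :
    l.foldl (fun r _ => g r) init = g^[l.length] init := by
  induction l generalizing init with
  | nil => rfl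
  | cons x t ih => simp [List.foldl, ih, Function.iterate_succ_apply]

theorem pop1_iterate_nil (k : Nat) : pop1^[k] [] = [] := by
  apply Function.iterate_fixed; rfl

theorem pop1_iterate_replicate (k c : Nat) (v : Int) (l : List Int) (h : k ≤ c) :
    pop1^[k] (l ++ List.replicate c v) = l ++ List.replicate (c - k) v := by
  induction k with
  | zero => simp
  | succ n ih =>
    rw [Function.iterate_succ_apply', ih (by omega)]
    have hc : c - n = (c - (n + 1)) + 1 := by omega
    rw [hc, List.replicate_succ', ← List.append_assoc]
    simp [pop1]

theorem posBS_popB (k : Nat) (bs : List (Int × Nat)) (h : PosBS bs) : PosBS (popB k bs) := by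
  induction bs generalizing k with
  | nil => simpa [popB] using h
  | cons p t ih =>
    obtain ⟨v, c⟩ := p
    simp only [popB]
    split_ifs with h0 h1
    · exact h
    · exact ih _ (fun q hq => h q (List.mem_cons_of_mem _ hq))
    · intro q hq
      rcases List.mem_cons.mp hq with rfl | hq
      · simpa using by omega
      · exact h q (List.mem_cons_of_mem _ hq)

theorem pop1_iterate_expandBS (k : Nat) (bs : List (Int × Nat)) (h : PosBS bs) :
    pop1^[k] (expandBS bs) = expandBS (popB k bs) := by
  induction bs generalizing k with
  | nil => simp [expandBS, popB, pop1_iterate_nil]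
  | cons p t ih =>
    obtain ⟨v, c⟩ := p
    have hc : 0 < c := h (v, c) (List.mem_cons_self)
    have ht : PosBS t := fun q hq => h q (List.mem_cons_of_mem _ hq)
    rw [expandBS_cons]
    simp only [popB]
    split_ifs with h0 h1
    · subst h0; simp [expandBS_cons]
    · have hk : k = (k - c) + c := by omega
      rw [hk, Function.iterate_add_apply,
          pop1_iterate_replicate c c v (expandBS t) le_rfl]
      simp [ih (k - c) ht]
    · rw [pop1_iterate_replicate k c v (expandBS t) (by omega), expandBS_cons]

-- A's loop body, phrased on a (value, flag) pair
def stepA (result : List Int) (p : Int × Bool) : List Int :=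
  if p.2 then
    result ++ PySem.List.pyRepeat [p.1] (p.1 * 2)
  else
    (PySem.List.pyRange 0 p.1 1).foldl (fun r _ => pop1 r) result

theorem stepA_expandBS (bs : List (Int × Nat)) (p : Int × Bool) (h : PosBS bs) :
    stepA (expandBS bs) p = expandBS (stepB bs p) := by
  obtain ⟨a, f⟩ := p
  cases f with
  | true =>
    have hm : a * 2 = 2 * a := by ring
    simp only [stepA, stepB, PySem.List.pyRepeat_singleton, hm]
    by_cases ha : 0 < a
    · simp [ha, expandBS_cons]
    · have h0 : (2 * a).toNat = 0 := by omega
      simp [ha, h0]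
  | false =>
    simp only [stepA, stepB, Bool.false_eq_true, if_false]
    rw [foldl_const_iterate pop1 (PySem.List.pyRange 0 a 1) (expandBS bs),
        PySem.List.length_pyRange_one]
    have ha : (a - 0).toNat = a.toNat := by omega
    rw [ha]
    exact pop1_iterate_expandBS a.toNat bs h

theorem posBS_stepB (bs : List (Int × Nat)) (p : Int × Bool) (h : PosBS bs) :
    PosBS (stepB bs p) := by
  unfold stepB
  split_ifs with h1 h2
  · intro q hq
    rcases List.mem_cons.mp hq with rfl | hq
    · simpa using by omega
    · exact h q hq
  · exact h
  · exact posBS_popB _ _ h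

theorem loop_eq (ps : List (Int × Bool)) (bs : List (Int × Nat)) (h : PosBS bs) :
    ps.foldl stepA (expandBS bs) = expandBS (ps.foldl stepB bs) := by
  induction ps generalizing bs with
  | nil => rfl
  | cons p t ih =>
    simp only [List.foldl]
    rw [stepA_expandBS bs p h]
    exact ih (stepB bs p) (posBS_stepB bs p h)

-- ===== VERDICT (by name: the statement is the Claim_ definition above) =====
theorem solution_spec : Claim_equal_solution := by
  intro arr flag _hdom hpre
  unfold Pre_solution at hpre
  unfold Spec_solution solution solution_alt
  have hlen : (List.zip arr flag).length = flag.length := by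
    rw [List.length_zip]; omega
  have hzl : ((flag.length : Int)) = ((List.zip arr flag).length : Int) := by rw [hlen]
  -- A's index fold = zip fold with stepA
  rw [hzl]
  rw [PySem.List.foldl_congr_mem _ _
      (fun result j => stepA result (PySem.List.pyGetD (List.zip arr flag) j (0, false))) []
      (by
        intro res i hi
        have hi' := (PySem.List.mem_pyRange_one).mp hi
        have h0 : 0 ≤ i := hi'.1
        have hlt : i < ((List.zip arr flag).length : Int) := hi'.2
        have hltf : i < (flag.length : Int) := by omega
        have hlta : i < (arr.length : Int) := by omega
        rw [PySem.List.pyGetD_eq_getElem flag false h0 hltf,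
            PySem.List.pyGetD_eq_getElem arr 0 h0 hlta]
        simp [stepA, pop1, PySem.List.pyGetD_eq_getElem (List.zip arr flag) (0, false) h0 hlt,
              List.getElem_zip])]
  rw [PySem.List.foldl_pyRange_zero_pyGetD' (List.zip arr flag) (0, false) stepA []]
  -- B's index fold = zip fold with stepB
  rw [PySem.List.foldl_congr_mem _ _
      (fun bs j => stepB bs (PySem.List.pyGetD (List.zip arr flag) j (0, false))) []
      (by
        intro bs i hi
        have hi' := (PySem.List.mem_pyRange_one).mp hi
        have h0 : 0 ≤ i := hi'.1
        have hlt : i < ((List.zip arr flag).length : Int) := hi'.2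
        have hltf : i < (flag.length : Int) := by omega
        have hlta : i < (arr.length : Int) := by omega
        rw [PySem.List.pyGetD_eq_getElem flag false h0 hltf,
            PySem.List.pyGetD_eq_getElem arr 0 h0 hlta]
        simp [PySem.List.pyGetD_eq_getElem (List.zip arr flag) (0, false) h0 hlt,
              List.getElem_zip])]
  rw [PySem.List.foldl_pyRange_zero_pyGetD' (List.zip arr flag) (0, false) stepB []]
  have h0 : ([] : List Int) = expandBS [] := rfl
  rw [h0, loop_eq (List.zip arr flag) [] (by intro q hq; simp at hq)]
  rw [PySem.List.foldl_append_eq_flatMap]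
  rfl
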